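-- pv_equiv track=rewrite | github.com/aw-aw/Foobar2021 | foobar.py | thumbWarBrute
-- ===== SOURCE A (Python) =====
-- def thumbWarBrute(a_count, b_count):
--     previous = []
--     while True:
--         if a_count == b_count:
--             return 2
--         if a_count < b_count:
--             b_temp = b_count - a_count
--             a_temp = 2 * a_count
--         else:
--             a_temp = a_count - b_count
--             b_temp = 2 * b_count
--         next = sorted([a_temp, b_temp])
--         if next in previous:
--             return 0
--         previous.append(next)
--         a_count = a_temp
--         b_count = b_temp  # this is the traditional algorithm
-- ===== SOURCE B (Python) =====
-- def thumbWarBrute(a_count, b_count):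
--     # Closed form: with s = a+b fixed, the state after k rounds is (2^k * a) mod s
--     # (up to swapping the pair), so the counts equalize iff some 2^k * a is congruent
--     # to s/2 mod s, which happens exactly when s // gcd(a, b) is a power of two
--     # (greater than 1); otherwise the pair cycles.
--     if a_count == b_count:
--         return 2
--     if a_count == 0 or b_count == 0:
--         return 0  # one side empty: the pair never changes, immediate cycle
--     a, b = a_count, b_count
--     while b:
--         a, b = b, a % b
--     t = (a_count + b_count) // a
--     while t % 2 == 0:
--         t //= 2
--     return 2 if t == 1 else 0
-- ===== Notes on version B (the rewrite author's own statement) =====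
-- stated objective: alternative
-- what changed: B replaces A's whole simulation loop (rewrite the pair, scan a growing list of sorted pairs for a repeat) with a closed-form arithmetic test: the counts equalize iff (a+b)//gcd(a,b) is a power of two, so B computes gcd by Euclid and strips factors of 2 -- no simulation, no visited structure.
import Mathlib
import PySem

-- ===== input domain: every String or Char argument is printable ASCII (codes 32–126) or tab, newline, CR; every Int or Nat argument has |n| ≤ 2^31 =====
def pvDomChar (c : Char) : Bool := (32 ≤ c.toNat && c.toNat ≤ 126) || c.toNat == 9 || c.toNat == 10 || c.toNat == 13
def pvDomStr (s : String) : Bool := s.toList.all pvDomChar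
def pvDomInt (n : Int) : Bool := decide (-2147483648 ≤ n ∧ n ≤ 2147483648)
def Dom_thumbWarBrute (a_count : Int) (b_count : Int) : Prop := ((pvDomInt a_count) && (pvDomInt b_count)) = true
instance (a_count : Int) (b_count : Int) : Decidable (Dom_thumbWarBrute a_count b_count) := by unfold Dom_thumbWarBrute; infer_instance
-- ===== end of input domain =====

-- B replaces A's pair-rewriting simulation with visited-list scan by the closed-form
-- number-theoretic test "(a+b)//gcd(a,b) is a power of two"; objective: alternative.


-- ===== PORT A =====
-- A's 'while True' loop; the fuel is only a totality device (on Pre_ each iteration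
-- inserts a fresh sorted pair with entries in [0, a+b], so (a+b).toNat + 2 never runs out).
def pvLoopA : Nat → Int → Int → List (List Int) → Int
  | 0, _, _, _ => 0
  | fuel + 1, a_count, b_count, previous =>
    if a_count = b_count then 2
    else
      let a_temp := if a_count < b_count then 2 * a_count else a_count - b_count
      let b_temp := if a_count < b_count then b_count - a_count else 2 * b_count
      let next := PySem.List.sorted [a_temp, b_temp] (fun x => x) false
      if next ∈ previous then 0
      else pvLoopA fuel a_temp b_temp (previous ++ [next])

def thumbWarBrute (a_count : Int) (b_count : Int) : Int :=
  pvLoopA ((a_count + b_count).toNat + 2) a_count b_count []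

-- ===== PORT B =====
-- Source B's Euclid loop 'while b: a, b = b, a % b'; fuel b.natAbs + 1 is only a totality
-- device (Python's loop terminates since |a % b| < |b|).
def pvGcdLoop : Nat → Int → Int → Int
  | 0, a, _ => a
  | fuel + 1, a, b => if b = 0 then a else pvGcdLoop fuel b (PySem.Int.mod a b)

-- Source B's 'while t % 2 == 0: t //= 2'; fuel t.toNat + 1 is only a totality device.
def pvHalve : Nat → Int → Int
  | 0, t => t
  | fuel + 1, t =>
    if PySem.Int.mod t 2 = 0 then pvHalve fuel (PySem.Int.floordiv t 2) else t

def thumbWarBrute_alt (a_count : Int) (b_count : Int) : Int :=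
  if a_count = b_count then 2
  else if a_count = 0 ∨ b_count = 0 then 0
  else
    let g := pvGcdLoop (b_count.natAbs + 1) a_count b_count
    let t := PySem.Int.floordiv (a_count + b_count) g
    if pvHalve (t.toNat + 1) t = 1 then 2 else 0

-- ===== PRECONDITION & SPEC =====
-- Pre_ excludes exactly the inputs with a negative count and a_count ≠ b_count, on which
-- Python A never returns (the loop diverges: the pair grows without bound, never equal,
-- never repeating); it admits every input on which A returns.
def Pre_thumbWarBrute (a_count : Int) (b_count : Int) : Prop :=
  (0 ≤ a_count ∧ 0 ≤ b_count) ∨ a_count = b_count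
instance (a_count : Int) (b_count : Int) : Decidable (Pre_thumbWarBrute a_count b_count) := by
  unfold Pre_thumbWarBrute; infer_instance
def pvWitness_thumbWarBrute : Int × Int := (2, 4)

def Spec_thumbWarBrute (a_count : Int) (b_count : Int) (out : Int) : Prop := out = thumbWarBrute_alt a_count b_count
instance (a_count : Int) (b_count : Int) (out : Int) : Decidable (Spec_thumbWarBrute a_count b_count out) := by unfold Spec_thumbWarBrute; infer_instance

-- ===== CLAIM (what is proved, stated in full; the proofs are below) =====
def Claim_equal_thumbWarBrute : Prop := ∀ (a_count : Int) (b_count : Int), Dom_thumbWarBrute a_count b_count → Pre_thumbWarBrute a_count b_count → Spec_thumbWarBrute a_count b_count (thumbWarBrute a_count b_count)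

-- ===== LEMMAS AND PROOFS =====

-- Proof-side residue view of A's loop: with s = a+b invariant, the (sorted) pair after a
-- step is {x, s-x} for x = (2·x_prev) mod s and the visited list is the set of keys
-- min(x, s-x); pvSim is that view of the SAME loop (bridged by pv_loop_eq below).
def pvSim : Nat → Int → Int → PySem.Set Int → Int
  | 0, _, _, _ => 0
  | fuel + 1, s, x, seen =>
    if 2 * x = s then 2
    else
      let nx := PySem.Int.mod (2 * x) s
      let key := min nx (s - nx)
      if PySem.Set.contains seen key then 0
      else pvSim fuel s nx (PySem.Set.add seen key)

-- value of (2*x) % s for 0 ≤ x ≤ s, 0 < s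
lemma pv_two_mul_emod (s x : Int) (hx0 : 0 ≤ x) (hxs : x ≤ s) :
    (2 * x) % s = if 2 * x < s then 2 * x else if x < s then 2 * x - s else 0 := by
  split_ifs with h1 h2
  · exact Int.emod_eq_of_lt (by omega) h1
  · rw [← Int.sub_emod_right (2 * x) s]
    exact Int.emod_eq_of_lt (by omega) (by omega)
  · have hxeq : 2 * x = s * 2 := by omega
    rw [hxeq, Int.mul_emod_right]

lemma pv_loop_eq (s : Int) :
    ∀ (fuel : Nat) (a b x : Int) (prev : List (List Int)) (seen : PySem.Set Int),
      a + b = s → 0 ≤ a → 0 ≤ b → 0 ≤ x → x ≤ s →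
      ((a = x ∧ b = s - x) ∨ (a = s - x ∧ b = x)) →
      prev = seen.map (fun m => [m, s - m]) →
      pvLoopA fuel a b prev = pvSim fuel s x seen := by
  intro fuel
  induction fuel with
  | zero => intro a b x prev seen _ _ _ _ _ _ _; rfl
  | succ f ih =>
    intro a b x prev seen hsum ha hb hx0 hxs hrel hprev
    rw [pvLoopA, pvSim]
    by_cases hab : a = b
    · rw [if_pos hab, if_pos (by omega)]
    · have h2xs : ¬ (2 * x = s) := by omega
      rw [if_neg hab, if_neg h2xs]
      have hspos : 0 < s := by omega
      show (if PySem.List.sorted [if a < b then 2 * a else a - b,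
                                  if a < b then b - a else 2 * b] (fun x => x) false ∈ prev then 0
            else pvLoopA f (if a < b then 2 * a else a - b) (if a < b then b - a else 2 * b)
              (prev ++ [PySem.List.sorted [if a < b then 2 * a else a - b,
                                           if a < b then b - a else 2 * b] (fun x => x) false]))
          = (if PySem.Set.contains seen
                (min (PySem.Int.mod (2 * x) s) (s - PySem.Int.mod (2 * x) s)) then 0
             else pvSim f s (PySem.Int.mod (2 * x) s)
               (PySem.Set.add seen
                 (min (PySem.Int.mod (2 * x) s) (s - PySem.Int.mod (2 * x) s))))
      set aT : Int := if a < b then 2 * a else a - b with haT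
      set bT : Int := if a < b then b - a else 2 * b with hbT
      set nx : Int := PySem.Int.mod (2 * x) s with hnx
      have hnxval : nx = if 2 * x < s then 2 * x else if x < s then 2 * x - s else 0 := by
        rw [hnx, PySem.Int.mod_eq_emod_of_pos hspos]
        exact pv_two_mul_emod s x hx0 hxs
      -- the new A-pair is {nx, s - nx}
      have hrelT : (aT = nx ∧ bT = s - nx) ∨ (aT = s - nx ∧ bT = nx) := by
        rcases hrel with ⟨h1, h2⟩ | ⟨h1, h2⟩ <;> rw [haT, hbT] <;> split_ifs with hlt <;>
          rw [hnxval] <;> split_ifs <;> omega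
      have hnx0 : 0 ≤ nx := by rw [hnxval]; split_ifs <;> omega
      have hnxlt : nx < s := by rw [hnxval]; split_ifs <;> omega
      set key : Int := min nx (s - nx) with hkey
      have hkc : key = nx ∨ key = s - nx := min_choice _ _
      have hk1 : key ≤ nx := min_le_left _ _
      have hk2 : key ≤ s - nx := min_le_right _ _
      -- sorted([a_temp, b_temp]) = [key, s - key]
      have hsorted : PySem.List.sorted [aT, bT] (fun x => x) false = [key, s - key] := by
        apply PySem.List.sorted_id_eq_of_perm_of_pairwise
        · have hcase : aT = key ∧ bT = s - key ∨ aT = s - key ∧ bT = key := by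
            rcases hrelT with ⟨h1, h2⟩ | ⟨h1, h2⟩ <;> omega
          rcases hcase with ⟨e1, e2⟩ | ⟨e1, e2⟩
          · rw [e1, e2]
          · rw [e1, e2]; exact List.Perm.swap _ _ _
        · exact List.pairwise_pair.mpr (by omega)
      rw [hsorted]
      -- the two membership tests agree
      have hmem : ([key, s - key] ∈ prev) ↔ key ∈ seen := by
        rw [hprev, List.mem_map]
        constructor
        · rintro ⟨m, hm, hmeq⟩
          have hm2 : m = key := (List.cons_eq_cons.mp hmeq).1
          rwa [hm2] at hm
        · intro hk; exact ⟨key, hk, rfl⟩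
      by_cases hin : key ∈ seen
      · rw [if_pos (hmem.mpr hin), if_pos (by rw [PySem.Set.contains_iff]; exact hin)]
      · rw [if_neg (fun h => hin (hmem.mp h)),
            if_neg (by rw [PySem.Set.contains_iff]; exact hin)]
        apply ih
        · rcases hrelT with ⟨h1, h2⟩ | ⟨h1, h2⟩ <;> omega
        · rcases hrelT with ⟨h1, h2⟩ | ⟨h1, h2⟩ <;> omega
        · rcases hrelT with ⟨h1, h2⟩ | ⟨h1, h2⟩ <;> omega
        · exact hnx0
        · omega
        · exact hrelT
        · rw [hprev, PySem.Set.add_of_not_mem hin, List.map_append]; rfl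

-- ---------- arithmetic toolkit ----------

-- pulling an emod out of a product
lemma pv_mul_emod (c y s : Int) : (c * (y % s)) % s = (c * y) % s := by
  conv_rhs => rw [Int.mul_emod]
  rw [Int.mul_emod c (y % s) s, Int.emod_emod_of_dvd _ dvd_rfl]

-- 2^m ∣ 2^i * c with c odd forces m ≤ i
lemma pv_pow2_le (m i : Nat) (c : Int) (hc : c % 2 = 1) (h : (2 : Int) ^ m ∣ 2 ^ i * c) :
    m ≤ i := by
  have hodd : Odd c.natAbs := by
    rw [Int.natAbs_odd, Int.odd_iff]; exact hc
  have hnat : (2 : Nat) ^ m ∣ 2 ^ i * c.natAbs := by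
    have := Int.natAbs_dvd_natAbs.mpr h
    simpa [Int.natAbs_mul, Int.natAbs_pow] using this
  have hcop : Nat.Coprime (2 ^ m) c.natAbs :=
    Nat.Coprime.pow_left m (Nat.coprime_two_left.mpr hodd)
  exact Nat.pow_dvd_pow_iff_le_right'.mp (hcop.dvd_of_dvd_mul_right hnat)

-- divisibility workhorse for the power-of-two case
lemma pv_key (G a' : Int) (m i : Nat) (c : Int) (hG : 0 < G) (hodd : a' % 2 = 1)
    (hc : c % 2 = 1) (hdvd : G * 2 ^ m ∣ 2 ^ i * (G * a') * c) : m ≤ i := by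
  have h2 : G * 2 ^ m ∣ G * (2 ^ i * (a' * c)) := by
    have he : 2 ^ i * (G * a') * c = G * (2 ^ i * (a' * c)) := by ring
    rwa [he] at hdvd
  have h3 : (2 : Int) ^ m ∣ 2 ^ i * (a' * c) := Int.dvd_of_mul_dvd h2 hG
  have hac : (a' * c) % 2 = 1 := by rw [Int.mul_emod, hodd, hc]; norm_num
  exact pv_pow2_le m i (a' * c) hac h3

-- s divides the difference of a number and its residue
lemma pv_dvd_sub_emod (y s : Int) : s ∣ y - y % s := by
  have h := Int.ediv_add_emod y s
  exact ⟨y / s, by omega⟩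

-- hitting the middle (2·residue = s) forces s ∣ 2^(j+1)·a
lemma pv_mid_dvd (s a : Int) (j : Nat) (h : 2 * ((2 ^ j * a) % s) = s) :
    s ∣ 2 ^ (j + 1) * a := by
  have h1 : s ∣ 2 ^ j * a - (2 ^ j * a) % s := pv_dvd_sub_emod _ s
  have h2 : s ∣ 2 * (2 ^ j * a - (2 ^ j * a) % s) := Dvd.dvd.mul_left h1 2
  have heq : 2 * (2 ^ j * a - (2 ^ j * a) % s) = 2 ^ (j + 1) * a - s := by
    rw [pow_succ]; linear_combination -h
  rw [heq] at h2
  have := dvd_add h2 (dvd_refl s)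
  simpa using this

-- shifting the doubling map under emod: (2^k · ((2x) % s)) % s = (2^(k+1) · x) % s
lemma pv_shift (s x : Int) (k : Nat) :
    (2 ^ k * ((2 * x) % s)) % s = (2 ^ (k + 1) * x) % s := by
  rw [pv_mul_emod]
  congr 1
  rw [pow_succ]; ring

-- ---------- A's loop in the residue view: the two outcomes ----------

-- if no iterate ever reaches the middle, pvSim returns 0 (detection or fuel exhaustion)
lemma pvSim_zero (s : Int) (hs : 0 < s) :
    ∀ (f : Nat) (x : Int) (seen : PySem.Set Int), 0 ≤ x → x < s →
      (∀ k : Nat, 2 * ((2 ^ k * x) % s) ≠ s) → pvSim f s x seen = 0 := by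
  intro f
  induction f with
  | zero => intro x seen _ _ _; rfl
  | succ f ih =>
    intro x seen hx0 hxs hk
    have h0 : ¬ (2 * x = s) := by
      have := hk 0
      rwa [pow_zero, one_mul, Int.emod_eq_of_lt hx0 hxs] at this
    rw [pvSim, if_neg h0]
    have hnxe : PySem.Int.mod (2 * x) s = (2 * x) % s :=
      PySem.Int.mod_eq_emod_of_pos hs
    by_cases hc : PySem.Set.contains seen
        (min (PySem.Int.mod (2 * x) s) (s - PySem.Int.mod (2 * x) s)) = true
    · rw [if_pos hc]
    · rw [if_neg hc]
      apply ih
      · rw [hnxe]; exact Int.emod_nonneg _ (by omega)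
      · rw [hnxe]; exact Int.emod_lt_of_pos _ hs
      · intro k
        rw [hnxe, pv_shift]
        exact hk (k + 1)

-- the residue at step m-1 is exactly the middle G·2^(m-1)
lemma pv_hit (G a' : Int) (m : Nat) (hG : 0 < G) (hodd : a' % 2 = 1) (hm : 1 ≤ m) :
    (2 ^ (m - 1) * (G * a')) % (G * 2 ^ m) = G * 2 ^ (m - 1) := by
  have hpow : (2 : Int) ^ m = 2 * 2 ^ (m - 1) := by
    rw [← pow_succ']
    congr 1
    omega
  have hd : 2 ^ (m - 1) * (G * a') = G * 2 ^ (m - 1) + (G * 2 ^ m) * (a' / 2) := by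
    have h2 : a' = 2 * (a' / 2) + 1 := by omega
    rw [hpow]; linear_combination (G * 2 ^ (m - 1)) * h2
  rw [hd, Int.add_mul_emod_self_left]
  apply Int.emod_eq_of_lt
  · positivity
  · rw [hpow]; nlinarith [pow_pos (by norm_num : (0:Int) < 2) (m - 1)]

-- before step m-1 the middle is never hit
lemma pv_nomid (G a' : Int) (m : Nat) (hG : 0 < G) (hodd : a' % 2 = 1)
    (j : Nat) (hj : j + 1 < m) :
    2 * ((2 ^ j * (G * a')) % (G * 2 ^ m)) ≠ G * 2 ^ m := by
  intro h
  have hd := pv_mid_dvd (G * 2 ^ m) (G * a') j h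
  have := pv_key G a' m (j + 1) 1 hG hodd (by norm_num) (by simpa using hd)
  omega

-- distinct keys before step m-1: residues at steps 1 ≤ i < l ≤ m-1 are neither equal
-- nor complementary
lemma pv_fresh (G a' : Int) (m : Nat) (hG : 0 < G) (hodd : a' % 2 = 1)
    (i l : Nat) (hil : i < l) (hlm : l + 1 ≤ m) :
    (2 ^ l * (G * a')) % (G * 2 ^ m) ≠ (2 ^ i * (G * a')) % (G * 2 ^ m) ∧
    (2 ^ l * (G * a')) % (G * 2 ^ m) ≠ G * 2 ^ m - (2 ^ i * (G * a')) % (G * 2 ^ m) := by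
  set s : Int := G * 2 ^ m with hsdef
  set a : Int := G * a' with hadef
  have hpowsplit : (2 : Int) ^ l = 2 ^ i * 2 ^ (l - i) := by
    rw [← pow_add]; congr 1; omega
  have hoddm : ∀ (d : Nat), 1 ≤ d → ((2 : Int) ^ d - 1) % 2 = 1 ∧ ((2 : Int) ^ d + 1) % 2 = 1 := by
    intro d hd
    have : (2 : Int) ^ d = 2 * 2 ^ (d - 1) := by
      rw [← pow_succ']; congr 1; omega
    constructor <;> omega
  have hdi : 1 ≤ l - i := by omega
  constructor
  · intro h
    have h1 : s ∣ 2 ^ l * a - (2 ^ l * a) % s := pv_dvd_sub_emod _ s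
    have h2 : s ∣ 2 ^ i * a - (2 ^ i * a) % s := pv_dvd_sub_emod _ s
    have h3 : s ∣ 2 ^ i * a * (2 ^ (l - i) - 1) := by
      have := dvd_sub h1 h2
      have he : 2 ^ l * a - (2 ^ l * a) % s - (2 ^ i * a - (2 ^ i * a) % s)
          = 2 ^ i * a * (2 ^ (l - i) - 1) := by
        rw [h, hpowsplit]; ring
      rwa [he] at this
    have := pv_key G a' m i (2 ^ (l - i) - 1) hG hodd (hoddm _ hdi).1 h3
    omega
  · intro h
    have h1 : s ∣ 2 ^ l * a - (2 ^ l * a) % s := pv_dvd_sub_emod _ s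
    have h2 : s ∣ 2 ^ i * a - (2 ^ i * a) % s := pv_dvd_sub_emod _ s
    have h3 : s ∣ 2 ^ i * a * (2 ^ (l - i) + 1) := by
      have hsum := dvd_add (dvd_add h1 h2) (dvd_refl s)
      have he : 2 ^ l * a - (2 ^ l * a) % s + (2 ^ i * a - (2 ^ i * a) % s) + s
          = 2 ^ i * a * (2 ^ (l - i) + 1) := by
        rw [h, hpowsplit]; ring
      rwa [he] at hsum
    have := pv_key G a' m i (2 ^ (l - i) + 1) hG hodd (hoddm _ hdi).2 h3
    omega

-- power-of-two case: the loop reaches the middle and returns 2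
lemma pvSim_reach (G a' : Int) (m : Nat) (hG : 0 < G) (hodd : a' % 2 = 1) (hm : 2 ≤ m) :
    ∀ (d f j : Nat) (x : Int) (seen : PySem.Set Int),
      j + d = m - 1 → x = (2 ^ j * (G * a')) % (G * 2 ^ m) → d < f →
      (∀ y ∈ seen, ∃ i : Nat, 1 ≤ i ∧ i ≤ j ∧
        y = min ((2 ^ i * (G * a')) % (G * 2 ^ m))
                (G * 2 ^ m - (2 ^ i * (G * a')) % (G * 2 ^ m))) →
      pvSim f (G * 2 ^ m) x seen = 2 := by
  intro d
  induction d with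
  | zero =>
    intro f j x seen hjd hx hf _
    obtain ⟨f', rfl⟩ : ∃ f', f = f' + 1 := ⟨f - 1, by omega⟩
    have hj : j = m - 1 := by omega
    rw [pvSim, if_pos]
    rw [hx, hj, pv_hit G a' m hG hodd (by omega)]
    have : (2 : Int) ^ m = 2 * 2 ^ (m - 1) := by
      rw [← pow_succ']; congr 1; omega
    rw [this]; ring
  | succ d ih =>
    intro f j x seen hjd hx hf hseen
    obtain ⟨f', rfl⟩ : ∃ f', f = f' + 1 := ⟨f - 1, by omega⟩
    set s : Int := G * 2 ^ m with hsdef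
    have hspos : 0 < s := by positivity
    have hmid : ¬ (2 * x = s) := by
      rw [hx]; exact pv_nomid G a' m hG hodd j (by omega)
    rw [pvSim, if_neg hmid]
    have hnxe : PySem.Int.mod (2 * x) s = (2 ^ (j + 1) * (G * a')) % s := by
      rw [PySem.Int.mod_eq_emod_of_pos hspos, hx, pv_mul_emod]
      congr 1
      rw [pow_succ]; ring
    set nx := PySem.Int.mod (2 * x) s with hnxdef
    set key := min nx (s - nx) with hkeydef
    have hfresh : PySem.Set.contains seen key ≠ true := by
      intro hc
      obtain ⟨i, hi1, hij, hy⟩ := hseen key (by rwa [PySem.Set.contains_iff] at hc)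
      have hne := pv_fresh G a' m hG hodd i (j + 1) (by omega) (by omega)
      set ri := (2 ^ i * (G * a')) % s
      set rl := (2 ^ (j + 1) * (G * a')) % s
      have hkl : key = min rl (s - rl) := by rw [hkeydef, hnxe]
      rcases min_choice ri (s - ri) with h1 | h1 <;>
        rcases min_choice rl (s - rl) with h2 | h2 <;>
          rw [hy] at hkl <;> omega
    rw [if_neg hfresh]
    apply ih f' (j + 1) nx (PySem.Set.add seen key) (by omega) hnxe (by omega)
    intro y hy
    rw [PySem.Set.mem_add] at hy
    rcases hy with h | h
    · obtain ⟨i, hi1, hij, hyv⟩ := hseen y h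
      exact ⟨i, hi1, by omega, hyv⟩
    · exact ⟨j + 1, by omega, le_refl _, by rw [h, hkeydef, hnxe]⟩

-- ---------- correctness of B's two loops ----------

lemma pvGcdLoop_eq :
    ∀ (f : Nat) (a b : Int), 0 ≤ a → 0 ≤ b → b.toNat < f →
      pvGcdLoop f a b = (Int.gcd a b : Int) := by
  intro f
  induction f with
  | zero => intro a b _ hb hf; omega
  | succ f ih =>
    intro a b ha hb hf
    rw [pvGcdLoop]
    by_cases hb0 : b = 0
    · rw [if_pos hb0, hb0]
      simp [Int.natAbs_of_nonneg ha]
    · rw [if_neg hb0]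
      have hbpos : 0 < b := by omega
      have hme : PySem.Int.mod a b = a % b := PySem.Int.mod_eq_emod_of_pos hbpos
      have h0 : 0 ≤ a % b := Int.emod_nonneg a hb0
      have h1 : a % b < b := Int.emod_lt_of_pos a hbpos
      rw [hme, ih b (a % b) hb h0 (by omega), Int.gcd_comm, Int.gcd_emod]

lemma pvHalve_eq_one_iff :
    ∀ (f : Nat) (t : Int), 0 < t → t ≤ (f : Int) →
      (pvHalve f t = 1 ↔ ∃ j : Nat, t = 2 ^ j) := by
  intro f
  induction f with
  | zero => intro t ht hf; omega
  | succ f ih =>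
    intro t ht hf
    rw [pvHalve]
    have hm2 : PySem.Int.mod t 2 = t % 2 := PySem.Int.mod_eq_emod_of_pos (by norm_num)
    have hd2 : PySem.Int.floordiv t 2 = t / 2 := PySem.Int.floordiv_eq_ediv_of_pos (by norm_num)
    by_cases he : t % 2 = 0
    · rw [if_pos (by rw [hm2]; exact he), hd2]
      push_cast at hf
      have h1 : 0 < t / 2 := by omega
      have h2 : t / 2 ≤ (f : Int) := by omega
      rw [ih (t / 2) h1 h2]
      constructor
      · rintro ⟨j, hj⟩
        exact ⟨j + 1, by rw [pow_succ]; omega⟩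
      · rintro ⟨j, hj⟩
        cases j with
        | zero => rw [pow_zero] at hj; omega
        | succ k => exact ⟨k, by rw [pow_succ] at hj; omega⟩
    · rw [if_neg (by rw [hm2]; exact he)]
      constructor
      · intro h1; exact ⟨0, by rw [pow_zero]; omega⟩
      · rintro ⟨j, hj⟩
        cases j with
        | zero => rw [pow_zero] at hj; omega
        | succ k => rw [pow_succ] at hj; omega

-- ---------- degenerate positive cases: one side zero ----------

lemma pvSim_tail_zero (f : Nat) (s : Int) (hs : 0 < s) :
    pvSim (f + 1) s 0 [0] = 0 := by
  have hnx : PySem.Int.mod (2 * 0) s = 0 := by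
    rw [PySem.Int.mod_eq_emod_of_pos hs]; simp
  rw [pvSim, if_neg (by omega)]
  simp only [hnx]
  rw [min_eq_left (by omega : (0:Int) ≤ s - 0)]
  rw [if_pos (by rw [PySem.Set.contains_iff]; simp)]

lemma pvSim_start_zero (f : Nat) (s : Int) (hs : 0 < s) :
    pvSim (f + 1 + 1) s 0 PySem.Set.empty = 0 := by
  have hnx : PySem.Int.mod (2 * 0) s = 0 := by
    rw [PySem.Int.mod_eq_emod_of_pos hs]; simp
  rw [pvSim, if_neg (by omega)]
  simp only [hnx]
  rw [min_eq_left (by omega : (0:Int) ≤ s - 0)]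
  rw [if_neg (by decide)]
  have hadd : PySem.Set.add PySem.Set.empty (0 : Int) = [0] := rfl
  rw [hadd]
  exact pvSim_tail_zero f s hs

lemma pvSim_start_top (f : Nat) (s : Int) (hs : 0 < s) :
    pvSim (f + 1 + 1) s s PySem.Set.empty = 0 := by
  have hnx : PySem.Int.mod (2 * s) s = 0 := by
    rw [PySem.Int.mod_eq_emod_of_pos hs, Int.mul_emod_left]
  rw [pvSim, if_neg (by omega)]
  simp only [hnx]
  rw [min_eq_left (by omega : (0:Int) ≤ s - 0)]
  rw [if_neg (by decide)]
  have hadd : PySem.Set.add PySem.Set.empty (0 : Int) = [0] := rfl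
  rw [hadd]
  exact pvSim_tail_zero f s hs

-- ===== VERDICT (by name: the statement is the Claim_ definition above) =====
theorem thumbWarBrute_spec : Claim_equal_thumbWarBrute := by
  intro a b _ hpre
  unfold Spec_thumbWarBrute thumbWarBrute thumbWarBrute_alt
  by_cases hab : a = b
  · rw [if_pos hab]
    show pvLoopA ((a + b).toNat + 2) a b [] = 2
    rw [pvLoopA, if_pos hab]
  · rw [if_neg hab]
    have hnn : 0 ≤ a ∧ 0 ≤ b := by
      rcases hpre with h | h
      · exact h
      · exact absurd h hab
    obtain ⟨ha0, hb0⟩ := hnn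
    have hs : 0 < a + b := by omega
    have hA : pvLoopA ((a + b).toNat + 2) a b []
        = pvSim ((a + b).toNat + 2) (a + b) a PySem.Set.empty :=
      pv_loop_eq (a + b) _ a b a [] PySem.Set.empty rfl ha0 hb0 ha0 (by omega)
        (Or.inl ⟨rfl, by omega⟩) rfl
    show pvLoopA ((a + b).toNat + 2) a b [] = _
    rw [hA]
    by_cases h0 : a = 0 ∨ b = 0
    · rw [if_pos h0]
      rcases h0 with rfl | rfl
      · exact pvSim_start_zero ((0 + b).toNat) (0 + b) hs
      · have hx : a + 0 = a := by omega
        rw [hx]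
        exact pvSim_start_top a.toNat a (by omega)
    · rw [if_neg h0]
      push_neg at h0
      have ha : 0 < a := by omega
      have hb : 0 < b := by omega
      set G : Int := (Int.gcd a b : Int) with hGdef
      have hGpos : 0 < G := by
        rw [hGdef]
        have := Int.gcd_pos_of_ne_zero_left b h0.1
        exact_mod_cast this
      have hgcd : pvGcdLoop (b.natAbs + 1) a b = G :=
        pvGcdLoop_eq _ a b ha0 hb0 (by omega)
      obtain ⟨a', ha'⟩ : G ∣ a := Int.gcd_dvd_left a b
      obtain ⟨b', hb'⟩ : G ∣ b := Int.gcd_dvd_right a b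
      have hsum : a + b = G * (a' + b') := by rw [ha', hb']; ring
      set t : Int := (a + b) / G with htdef
      have ht' : t = a' + b' := by
        rw [htdef, hsum, Int.mul_ediv_cancel_left _ (by omega)]
      have htd : PySem.Int.floordiv (a + b) G = t :=
        PySem.Int.floordiv_eq_ediv_of_pos hGpos
      have ha'pos : 0 < a' := by
        by_contra h
        push_neg at h
        have : G * a' ≤ 0 := mul_nonpos_of_nonneg_of_nonpos (by omega) h
        omega
      have hb'pos : 0 < b' := by
        by_contra h
        push_neg at h
        have : G * b' ≤ 0 := mul_nonpos_of_nonneg_of_nonpos (by omega) h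
        omega
      have hab' : a' ≠ b' := by
        intro h; rw [h] at ha'; omega
      have ht3 : 3 ≤ t := by omega
      have ha'div : a' = a / G := by
        rw [ha', Int.mul_ediv_cancel_left _ (by omega)]
      have hb'div : b' = b / G := by
        rw [hb', Int.mul_ediv_cancel_left _ (by omega)]
      have hcop : Int.gcd a' b' = 1 := by
        rw [ha'div, hb'div]
        exact Int.gcd_ediv_gcd_ediv_gcd (by rw [hGdef] at hGpos; exact_mod_cast hGpos)
      have hcopt : Int.gcd a' t = 1 := by
        rw [ht', Int.gcd_self_add_right, hcop]
      simp only [hgcd, htd]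
      have htle : t ≤ ((t.toNat + 1 : Nat) : Int) := by push_cast; omega
      by_cases hP : ∃ j : Nat, t = 2 ^ j
      · obtain ⟨m, hm⟩ := hP
        have hm2 : 2 ≤ m := by
          rcases m with _ | _ | m
          · rw [pow_zero] at hm; omega
          · rw [pow_one] at hm; omega
          · omega
        have hodd : a' % 2 = 1 := by
          have h2 : a' % 2 = 0 ∨ a' % 2 = 1 := by omega
          rcases h2 with h2 | h2
          · exfalso
            have hd1 : (2 : Int) ∣ a' := Int.dvd_of_emod_eq_zero h2
            have hd2 : (2 : Int) ∣ t := by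
              rw [hm]; exact dvd_pow_self 2 (by omega)
            have := Int.dvd_gcd hd1 hd2
            rw [hcopt] at this
            norm_num at this
          · exact h2
        have hsG : a + b = G * 2 ^ m := by rw [hsum, ← ht', hm]
        have hhalve : pvHalve (t.toNat + 1) t = 1 :=
          (pvHalve_eq_one_iff (t.toNat + 1) t (by omega) htle).mpr ⟨m, hm⟩
        rw [if_pos hhalve]
        rw [hsG]
        have hmlt : (m : Int) < 2 ^ m := by
          have := Nat.lt_two_pow_self (n := m)
          exact_mod_cast this
        have h2mt : (2 : Int) ^ m ≤ a + b := by
          rw [hsG]; nlinarith [pow_pos (by norm_num : (0:Int) < 2) m]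
        apply pvSim_reach G a' m hGpos hodd hm2 (m - 1) _ 0 a PySem.Set.empty
          (by omega)
        · rw [pow_zero, one_mul, ← ha', ← hsG, Int.emod_eq_of_lt ha0 (by omega)]
        · omega
        · intro y hy
          exact absurd hy (List.not_mem_nil)
      · have hhalve : pvHalve (t.toNat + 1) t ≠ 1 := by
          intro h
          exact hP ((pvHalve_eq_one_iff (t.toNat + 1) t (by omega) htle).mp h)
        rw [if_neg hhalve]
        apply pvSim_zero (a + b) hs _ a PySem.Set.empty ha0 (by omega)
        intro k heq
        have hd : a + b ∣ 2 ^ (k + 1) * a := pv_mid_dvd (a + b) a k heq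
        have hd2 : G * t ∣ G * (2 ^ (k + 1) * a') := by
          have he : G * t = a + b := by rw [ht', ← hsum]
          have he2 : G * (2 ^ (k + 1) * a') = 2 ^ (k + 1) * a := by rw [ha']; ring
          rw [he, he2]; exact hd
        have hd3 : t ∣ 2 ^ (k + 1) * a' := Int.dvd_of_mul_dvd hd2 hGpos
        have hcp : IsCoprime t a' := by
          apply Int.isCoprime_iff_gcd_eq_one.mpr
          rw [Int.gcd_comm]
          exact hcopt
        have hd4 : t ∣ 2 ^ (k + 1) := hcp.dvd_of_dvd_mul_right hd3
        have hd5 : t.natAbs ∣ 2 ^ (k + 1) := by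
          have := Int.natAbs_dvd_natAbs.mpr hd4
          simpa [Int.natAbs_pow] using this
        obtain ⟨j, _, hj⟩ := (Nat.dvd_prime_pow Nat.prime_two).mp hd5
        apply hP
        refine ⟨j, ?_⟩
        have : t = (t.natAbs : Int) := by
          rw [Int.natAbs_of_nonneg (by omega)]
        rw [this, hj]
        push_cast
        ring
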